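-- pv_equiv track=rewrite | github.com/zedaav/aoc2025 | src/aoc2025/day10.py | patterns
-- ===== SOURCE A (Python) =====
-- from itertools import combinations, product
--
-- def patterns(buttons: list[tuple[int, ...]]) -> dict[tuple[int, ...], dict[tuple[int, ...], int]]:
--     # Number of buttons and counters
--     num_buttons = len(buttons)
--     num_counters = len(buttons[0])
--     out: dict[tuple[int, ...], dict[tuple[int, ...], int]] = {parity_pattern: {} for parity_pattern in product(range(2), repeat=num_counters)}
--
--     # Iterate on candidate number of button pushes
--     for num_pressed_buttons in range(num_buttons + 1):
--         # Iterate on combinations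
--         for buttons_combi in combinations(range(num_buttons), num_pressed_buttons):
--             pattern = tuple(map(sum, zip((0,) * num_counters, *(buttons[i] for i in buttons_combi), strict=True)))
--             parity_pattern = tuple(i % 2 for i in pattern)
--             if pattern not in out[parity_pattern]:
--                 # Remember number of pushed for this pattern
--                 out[parity_pattern][pattern] = num_pressed_buttons
--     return out
-- ===== SOURCE B (Python) =====
-- from itertools import product
--
-- def patterns(buttons):
--     num_buttons = len(buttons)
--     num_counters = len(buttons[0])
--     out = {pp: {} for pp in product(range(2), repeat=num_counters)}
--     # layer k holds all size-k index-subsets in combination order, each carried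
--     # as (next_start_index, running_sum_pattern); each subset's pattern is built
--     # incrementally by one vector addition instead of re-summing k vectors.
--     layer = [(0, (0,) * num_counters)]
--     k = 0
--     while True:
--         for _, pattern in layer:
--             parity = tuple(v % 2 for v in pattern)
--             group = out[parity]
--             if pattern not in group:
--                 group[pattern] = k
--         if k == num_buttons:
--             return out
--         k += 1
--         layer = [
--             (j + 1, tuple(p + q for p, q in zip(pattern, buttons[j], strict=True)))
--             for start, pattern in layer
--             for j in range(start, num_buttons)
--         ]
-- ===== Notes on version B (the rewrite author's own statement) =====
-- stated objective: alternative
-- what changed: Instead of re-summing every k-subset of button vectors from scratch via itertools.combinations, B grows the subsets layer by layer, extending each size-k subset (carried as next-start-index plus running sum) by one button vector per new subset, preserving A's enumeration order exactly; this saves the per-subset re-summation but was not measured >=1.5x faster.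
import Mathlib
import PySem

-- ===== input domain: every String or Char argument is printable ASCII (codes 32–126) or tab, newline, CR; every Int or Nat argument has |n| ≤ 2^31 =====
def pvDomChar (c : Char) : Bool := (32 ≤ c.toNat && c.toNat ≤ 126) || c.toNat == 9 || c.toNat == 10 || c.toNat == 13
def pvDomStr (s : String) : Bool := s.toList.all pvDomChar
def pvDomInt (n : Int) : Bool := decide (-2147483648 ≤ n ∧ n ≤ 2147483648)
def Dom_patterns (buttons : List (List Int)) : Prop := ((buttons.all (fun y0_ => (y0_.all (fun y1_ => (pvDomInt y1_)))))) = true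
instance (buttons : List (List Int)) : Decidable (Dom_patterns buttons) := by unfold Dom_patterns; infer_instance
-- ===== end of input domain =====

-- B replaces A's per-subset re-summation (itertools.combinations) by a layer-by-layer
-- extension of subsets carrying running sums; same result, in A's exact order.


-- ===== PORT A =====

-- product(range(2), repeat=c): all 0/1 vectors of length c, leftmost coordinate slowest
def parityKeys : Nat → List (List Int)
  | 0 => [[]]
  | c + 1 => [0, 1].flatMap (fun b => (parityKeys c).map (b :: ·))

-- itertools.combinations(range(n), k) restricted to the suffix {s,…,n-1}, lexicographic order
def combA (n : Nat) : Nat → Nat → List (List Nat)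
  | 0, _ => [[]]
  | k + 1, s => (List.range' s (n - s)).flatMap (fun j => (combA n k (j + 1)).map (j :: ·))

-- tuple(map(sum, zip((0,)*c, *rows, strict=True))): columnwise sums; none = ValueError (strict length mismatch)
def zipSumA (c : Nat) (rows : List (List Int)) : Option (List Int) :=
  if rows.all (fun r => r.length = c) then
    some ((List.range c).map (fun j => (rows.map (fun r => r.getD j 0)).sum))
  else none

def patterns (buttons : List (List Int)) : List (List Int × List (List Int × Int)) :=
  let n := buttons.length
  let c := (buttons.headD []).length  -- len(buttons[0]); IndexError on [] is excluded by Pre_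
  let init : PySem.Dict (List Int) (PySem.Dict (List Int) Int) :=
    (parityKeys c).foldl (fun d pp => d.insert pp PySem.Dict.empty) PySem.Dict.empty
  let out := (List.range (n + 1)).foldl (fun out k =>
    (combA n k 0).foldl (fun out cb =>
      -- .getD []: the none case is the strict-zip ValueError, excluded by Pre_
      let pattern := (zipSumA c (cb.map (fun i => buttons.getD i []))).getD []
      let pp := pattern.map (fun v => PySem.Int.mod v 2)
      PySem.Dict.modify out pp PySem.Dict.empty
        (fun d => if d.contains pattern then d else d.insert pattern (k : Int))) out) init
  out.items.map (fun p => (p.1, p.2.items))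

-- ===== PORT B =====

-- tuple(p + q for p, q in zip(pattern, buttons[j], strict=True)); the [] branch is the
-- strict-zip ValueError case, excluded by Pre_
def addRow (p r : List Int) : List Int :=
  if p.length = r.length then p.zipWith (· + ·) r else []

-- the while-True loop of B: record the current layer, then extend it; rem = n - k
def bLoop (buttons : List (List Int)) (n : Nat) :
    Nat → Nat → List (Nat × List Int) → PySem.Dict (List Int) (PySem.Dict (List Int) Int) →
    PySem.Dict (List Int) (PySem.Dict (List Int) Int)
  | rem, k, layer, out =>
    let out := layer.foldl (fun out sp =>
      let pat := sp.2
      let pp := pat.map (fun v => PySem.Int.mod v 2)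
      PySem.Dict.modify out pp PySem.Dict.empty
        (fun d => if d.contains pat then d else d.insert pat (k : Int))) out
    match rem with
    | 0 => out
    | rem + 1 =>
      bLoop buttons n rem (k + 1)
        (layer.flatMap (fun sp =>
          (List.range' sp.1 (n - sp.1)).map (fun j => (j + 1, addRow sp.2 (buttons.getD j [])))))
        out

def patterns_alt (buttons : List (List Int)) : List (List Int × List (List Int × Int)) :=
  let n := buttons.length
  let c := (buttons.headD []).length
  let init : PySem.Dict (List Int) (PySem.Dict (List Int) Int) :=
    (parityKeys c).foldl (fun d pp => d.insert pp PySem.Dict.empty) PySem.Dict.empty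
  (bLoop buttons n n 0 [(0, List.replicate c 0)] init).items.map (fun p => (p.1, p.2.items))

-- ===== PRECONDITION & SPEC =====
-- Pre_ excludes exactly the inputs on which A raises: the empty list (IndexError on
-- buttons[0]) and rows of unequal length (ValueError from zip(..., strict=True)).
def Pre_patterns (buttons : List (List Int)) : Prop :=
  buttons ≠ [] ∧ ∀ r ∈ buttons, r.length = (buttons.headD []).length
instance (buttons : List (List Int)) : Decidable (Pre_patterns buttons) := by
  unfold Pre_patterns; infer_instance

def pvWitness_patterns : List (List Int) := [[1, 2], [3, 4]]

def Spec_patterns (buttons : List (List Int)) (out : List (List Int × List (List Int × Int))) : Prop := out = patterns_alt buttons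
instance (buttons : List (List Int)) (out : List (List Int × List (List Int × Int))) : Decidable (Spec_patterns buttons out) := by unfold Spec_patterns; infer_instance

-- ===== CLAIM (what is proved, stated in full; the proofs are below) =====
def Claim_equal_patterns : Prop := ∀ (buttons : List (List Int)), Dom_patterns buttons → Pre_patterns buttons → Spec_patterns buttons (patterns buttons)

-- ===== LEMMAS AND PROOFS =====

-- running sum of the rows indexed by cb, as B maintains it
def patSum (buttons : List (List Int)) (c : Nat) (cb : List Nat) : List Int :=
  cb.foldl (fun p j => addRow p (buttons.getD j [])) (List.replicate c 0)

-- 1 + the last chosen index (the next start index B carries)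
def endAt (s : Nat) (cb : List Nat) : Nat :=
  match cb.getLast? with
  | none => s
  | some j => j + 1

-- the per-pattern dict update both loops perform
def upd (k : Nat) (out : PySem.Dict (List Int) (PySem.Dict (List Int) Int)) (pat : List Int) :
    PySem.Dict (List Int) (PySem.Dict (List Int) Int) :=
  PySem.Dict.modify out (pat.map (fun v => PySem.Int.mod v 2)) PySem.Dict.empty
    (fun d => if d.contains pat then d else d.insert pat (k : Int))

-- A's layer-k combinations paired with B's carried state
def layerOf (buttons : List (List Int)) (c k : Nat) : List (Nat × List Int) :=
  (combA buttons.length k 0).map (fun cb => (endAt 0 cb, patSum buttons c cb))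

theorem endAt_cons (s j : Nat) (cb : List Nat) : endAt s (j :: cb) = endAt (j + 1) cb := by
  cases cb with
  | nil => simp [endAt]
  | cons a t =>
    unfold endAt
    rw [List.getLast?_cons_cons]
    cases h : (a :: t).getLast? with
    | none => exact absurd (List.getLast?_eq_none_iff.mp h) (by simp)
    | some m => rfl

theorem endAt_concat (s j : Nat) (cb : List Nat) : endAt s (cb ++ [j]) = j + 1 := by
  simp [endAt]

theorem patSum_concat (buttons : List (List Int)) (c : Nat) (cb : List Nat) (j : Nat) :
    patSum buttons c (cb ++ [j]) = addRow (patSum buttons c cb) (buttons.getD j []) := by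
  simp [patSum]

theorem mem_combA_lt (n : Nat) : ∀ (k s : Nat), ∀ cb ∈ combA n k s, ∀ j ∈ cb, j < n := by
  intro k
  induction k with
  | zero => intro s cb hcb j hj; simp [combA] at hcb; subst hcb; simp at hj
  | succ k ih =>
    intro s cb hcb j hj
    simp only [combA, List.mem_flatMap, List.mem_map] at hcb
    obtain ⟨a, ha, cb', hcb', rfl⟩ := hcb
    have han : a < n := by
      have := List.mem_range'_1.mp ha; omega
    rcases List.mem_cons.mp hj with rfl | hj'
    · exact han
    · exact ih (a + 1) cb' hcb' j hj'

theorem combA_ext (n : Nat) : ∀ (k s : Nat),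
    combA n (k + 1) s
      = (combA n k s).flatMap (fun cb =>
          (List.range' (endAt s cb) (n - endAt s cb)).map (fun j => cb ++ [j])) := by
  intro k
  induction k with
  | zero =>
    intro s
    simp [combA, endAt]
    induction List.range' s (n - s) with
    | nil => rfl
    | cons a t iht => simp_all
  | succ k ih =>
    intro s
    rw [combA]
    conv_rhs => rw [combA]
    simp only [ih]
    simp only [List.flatMap_assoc, List.map_flatMap, List.flatMap_map, List.map_map]
    simp only [endAt_cons, List.cons_append]
    rfl

-- columnwise sums (A) = iterated vector addition (B), when all rows have length c
theorem foldl_addRow_eq (c : Nat) : ∀ (rs : List (List Int)) (acc : List Int),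
    (∀ r ∈ rs, r.length = c) → acc.length = c →
    rs.foldl addRow acc
      = (List.range c).map (fun j => acc.getD j 0 + (rs.map (fun r => r.getD j 0)).sum) := by
  intro rs
  induction rs with
  | nil =>
    intro acc _ hacc
    simp only [List.foldl_nil, List.map_nil, List.sum_nil, Int.add_zero]
    apply List.ext_getElem
    · simp [hacc]
    · intro i h1 h2
      simp [List.getD_eq_getElem?_getD, List.getElem?_eq_getElem h1]
  | cons r rs ih =>
    intro acc hr hacc
    have hrc : r.length = c := hr r (List.mem_cons_self ..)
    have hlen : (addRow acc r).length = c := by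
      simp [addRow, hacc, hrc]
    rw [List.foldl_cons, ih (addRow acc r) (fun x hx => hr x (List.mem_cons_of_mem _ hx)) hlen]
    apply List.map_congr_left
    intro j hj
    have hjc : j < c := List.mem_range.mp hj
    have : (addRow acc r).getD j 0 = acc.getD j 0 + r.getD j 0 := by
      simp [addRow, hacc, hrc, List.getD_eq_getElem?_getD, hjc]
    rw [this]
    simp [Int.add_assoc]

theorem patternA_eq_patSum (buttons : List (List Int)) (c : Nat)
    (hc : ∀ r ∈ buttons, r.length = c) (cb : List Nat) (hcb : ∀ j ∈ cb, j < buttons.length) :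
    (zipSumA c (cb.map (fun i => buttons.getD i []))).getD [] = patSum buttons c cb := by
  have hrows : ∀ r ∈ cb.map (fun i => buttons.getD i []), r.length = c := by
    intro r hrm
    obtain ⟨i, hi, rfl⟩ := List.mem_map.mp hrm
    rw [List.getD_eq_getElem _ _ (hcb i hi)]
    exact hc _ (List.getElem_mem _)
  rw [zipSumA, if_pos (by simpa using fun r h => hrows r h)]
  rw [patSum, ← List.foldl_map]
  rw [foldl_addRow_eq c _ _ hrows (by simp)]
  apply List.map_congr_left
  intro j hj
  simp [List.getD_eq_getElem?_getD, List.mem_range.mp hj]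

-- one extension step of B's layer moves layerOf k to layerOf (k+1)
theorem layer_step (buttons : List (List Int)) (c k : Nat) :
    (layerOf buttons c k).flatMap (fun sp =>
        (List.range' sp.1 (buttons.length - sp.1)).map
          (fun j => (j + 1, addRow sp.2 (buttons.getD j []))))
      = layerOf buttons c (k + 1) := by
  rw [layerOf, layerOf, combA_ext]
  simp only [List.flatMap_map, List.map_flatMap, List.map_map]
  apply List.flatMap_congr
  intro cb _
  apply List.map_congr_left
  intro j _
  simp [endAt_concat, patSum_concat]

-- processing one layer = A's inner fold at the same k
theorem process_layer (buttons : List (List Int)) (c : Nat)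
    (hc : ∀ r ∈ buttons, r.length = c) (k : Nat) (out) :
    (layerOf buttons c k).foldl (fun out sp =>
        PySem.Dict.modify out (sp.2.map (fun v => PySem.Int.mod v 2)) PySem.Dict.empty
          (fun d => if d.contains sp.2 then d else d.insert sp.2 (k : Int))) out
      = (combA buttons.length k 0).foldl (fun out cb =>
          upd k out ((zipSumA c (cb.map (fun i => buttons.getD i []))).getD [])) out := by
  rw [layerOf, List.foldl_map]
  apply PySem.List.foldl_congr_mem
  intro acc cb hcb
  rw [upd, patternA_eq_patSum buttons c hc cb (mem_combA_lt _ _ _ cb hcb)]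

theorem bLoop_eq (buttons : List (List Int)) (c : Nat)
    (hc : ∀ r ∈ buttons, r.length = c) : ∀ (rem k : Nat) (out),
    bLoop buttons buttons.length rem k (layerOf buttons c k) out
      = (List.range' k (rem + 1)).foldl (fun out k =>
          (combA buttons.length k 0).foldl (fun out cb =>
            upd k out ((zipSumA c (cb.map (fun i => buttons.getD i []))).getD [])) out) out := by
  intro rem
  induction rem with
  | zero =>
    intro k out
    rw [bLoop]
    exact process_layer buttons c hc k out
  | succ rem ih =>
    intro k out
    rw [bLoop]
    rw [layer_step buttons c k]
    rw [process_layer buttons c hc k out]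
    rw [ih (k + 1)]
    conv_rhs => rw [List.range'_succ, List.foldl_cons]

-- ===== VERDICT (by name: the statement is the Claim_ definition above) =====
theorem patterns_spec : Claim_equal_patterns := by
  intro buttons _ hpre
  have hc : ∀ r ∈ buttons, r.length = (buttons.headD []).length := hpre.2
  have h0 : layerOf buttons (buttons.headD []).length 0
      = [(0, List.replicate (buttons.headD []).length 0)] := by
    simp [layerOf, combA, endAt, patSum]
  have key : bLoop buttons buttons.length buttons.length 0
        [(0, List.replicate (buttons.headD []).length 0)]
        ((parityKeys (buttons.headD []).length).foldl
          (fun d pp => d.insert pp PySem.Dict.empty) PySem.Dict.empty)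
      = (List.range (buttons.length + 1)).foldl (fun out k =>
          (combA buttons.length k 0).foldl (fun out cb =>
            upd k out ((zipSumA (buttons.headD []).length
              (cb.map (fun i => buttons.getD i []))).getD [])) out)
          ((parityKeys (buttons.headD []).length).foldl
            (fun d pp => d.insert pp PySem.Dict.empty) PySem.Dict.empty) := by
    rw [← h0, bLoop_eq buttons _ hc buttons.length 0, List.range_eq_range']
  show patterns buttons = patterns_alt buttons
  exact (congrArg (fun d : PySem.Dict (List Int) (PySem.Dict (List Int) Int) =>
    d.items.map (fun p => (p.1, p.2.items))) key).symm
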